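-- pv_equiv track=rewrite | github.com/ArturNC-UERJ/FGV-Solutions | main.py | regioes
-- ===== SOURCE A (Python) =====
-- def regioes(opcao, listaCTS):
--
--     tabela = ['AM','RR','AP','PA','TO','RO','AC', #0 = NORTE
--               'MA','PI','CE','RN','PE','PB','SE','AL','BA', #1 = NORDESTE
--               'MT','MS','GO','DF', #2 = CENTROOESTE
--               'RJ','SP','ES','MG', #3 = SUDESTE
--               'PR','RS','SC'] #4 = SUL
--
--
--
--     reg_norte = list()
--     reg_nordeste = list()
--     reg_centroOeste = list()
--     reg_sudeste = list()
--     reg_sul = list()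
--
--     for i in range(len(listaCTS)):
--
--         vec_aux_padrao = listaCTS[i]
--         vec_aux_splitado = listaCTS[i].split('\n')
--
--         if vec_aux_splitado[0][-2:] in tabela:
--             if 6 >= tabela.index(vec_aux_splitado[0][-2:]) >= 0:
--                 reg_norte.append(vec_aux_padrao)
--             elif 15 >= tabela.index(vec_aux_splitado[0][-2:]) > 6:
--                 reg_nordeste.append(vec_aux_padrao)
--             elif 19 >= tabela.index(vec_aux_splitado[0][-2:]) > 15:
--                 reg_centroOeste.append(vec_aux_padrao)
--             elif 23 >= tabela.index(vec_aux_splitado[0][-2:]) > 19: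
--                 reg_sudeste.append(vec_aux_padrao)
--             elif 26 >= tabela.index(vec_aux_splitado[0][-2:]) > 23:
--                 reg_sul.append(vec_aux_padrao)
--
--     if opcao == 1:
--         return reg_norte
--     if opcao == 2:
--         return reg_nordeste
--     if opcao == 3:
--         return reg_centroOeste
--     if opcao == 4:
--         return reg_sudeste
--     if opcao == 5:
--         return reg_sul
--     return
-- ===== SOURCE B (Python) =====
-- _GROUPS = {
--     1: {'AM', 'RR', 'AP', 'PA', 'TO', 'RO', 'AC'},                # NORTE
--     2: {'MA', 'PI', 'CE', 'RN', 'PE', 'PB', 'SE', 'AL', 'BA'},    # NORDESTE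
--     3: {'MT', 'MS', 'GO', 'DF'},                                  # CENTRO-OESTE
--     4: {'RJ', 'SP', 'ES', 'MG'},                                  # SUDESTE
--     5: {'PR', 'RS', 'SC'},                                        # SUL
-- }
--
--
-- def regioes(opcao, listaCTS):
--     codes = _GROUPS.get(opcao)
--     if codes is None:
--         return None
--     return [item for item in listaCTS if item.split('\n')[0][-2:] in codes]
-- ===== Notes on version B (the rewrite author's own statement) =====
-- stated objective: simpler
-- what changed: Instead of bucketing every item into five region lists via tabela.index() range cascades and then selecting one, B first resolves opcao to the requested region's code set (returning None if opcao is not 1-5) and produces the answer as a single filter over listaCTS, never materialising the other four regions.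
import Mathlib
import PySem

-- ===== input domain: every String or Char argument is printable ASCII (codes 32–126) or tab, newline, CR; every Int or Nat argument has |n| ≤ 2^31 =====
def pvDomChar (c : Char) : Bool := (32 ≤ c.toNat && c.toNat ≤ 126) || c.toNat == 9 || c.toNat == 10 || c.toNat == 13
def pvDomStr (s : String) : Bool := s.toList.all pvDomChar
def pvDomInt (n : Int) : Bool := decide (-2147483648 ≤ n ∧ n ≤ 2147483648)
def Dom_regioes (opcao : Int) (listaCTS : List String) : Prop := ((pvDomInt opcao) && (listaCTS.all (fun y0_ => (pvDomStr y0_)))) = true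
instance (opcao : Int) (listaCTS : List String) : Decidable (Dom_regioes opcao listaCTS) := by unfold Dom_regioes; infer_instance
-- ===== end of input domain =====

-- B resolves opcao to the requested region's code set first and returns a single filter
-- over listaCTS, instead of A's five-bucket build via tabela.index() range cascades (objective: simpler).

-- shared trivial helper: the state code item.split('\n')[0][-2:] (identical expression in both Pythons)
def pvCodeOf (item : String) : String :=
  PySem.Str.slice (PySem.List.pyGetD ((PySem.Str.split? item "\n").getD []) 0 "") (some (-2)) none

-- ===== PORT A =====
def pvTabela : List String :=
  ["AM","RR","AP","PA","TO","RO","AC",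
   "MA","PI","CE","RN","PE","PB","SE","AL","BA",
   "MT","MS","GO","DF",
   "RJ","SP","ES","MG",
   "PR","RS","SC"]

-- the five region lists, in A's declaration order
abbrev PvSt := List String × List String × List String × List String × List String

-- body of A's for-loop: membership test then the index-range cascade (index? recomputed per
-- branch, as the Python recomputes .index; `.getD 0` only reached under the membership guard)
def pvStepA (st : PvSt) (s : String) : PvSt :=
  let code := pvCodeOf s
  if pvTabela.contains code then
    if 6 ≥ (PySem.List.index? pvTabela code).getD 0 then
      (st.1 ++ [s], st.2.1, st.2.2.1, st.2.2.2.1, st.2.2.2.2)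
    else if 15 ≥ (PySem.List.index? pvTabela code).getD 0 then
      (st.1, st.2.1 ++ [s], st.2.2.1, st.2.2.2.1, st.2.2.2.2)
    else if 19 ≥ (PySem.List.index? pvTabela code).getD 0 then
      (st.1, st.2.1, st.2.2.1 ++ [s], st.2.2.2.1, st.2.2.2.2)
    else if 23 ≥ (PySem.List.index? pvTabela code).getD 0 then
      (st.1, st.2.1, st.2.2.1, st.2.2.2.1 ++ [s], st.2.2.2.2)
    else if 26 ≥ (PySem.List.index? pvTabela code).getD 0 then
      (st.1, st.2.1, st.2.2.1, st.2.2.2.1, st.2.2.2.2 ++ [s])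
    else st
  else st

def regioes (opcao : Int) (listaCTS : List String) : Option (List String) :=
  let st : PvSt := ([], [], [], [], [])
  let st := (PySem.List.pyRange 0 (PySem.List.len listaCTS)).foldl
      (fun st i => pvStepA st (PySem.List.pyGetD listaCTS i "")) st
  if opcao = 1 then some st.1
  else if opcao = 2 then some st.2.1
  else if opcao = 3 then some st.2.2.1
  else if opcao = 4 then some st.2.2.2.1
  else if opcao = 5 then some st.2.2.2.2
  else none

-- ===== PORT B =====
-- B's _GROUPS: opcao → that region's set of state codes
def pvGroups : PySem.Dict Int (PySem.Set String) :=
  PySem.Dict.ofList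
    [(1, PySem.Set.ofList ["AM","RR","AP","PA","TO","RO","AC"]),
     (2, PySem.Set.ofList ["MA","PI","CE","RN","PE","PB","SE","AL","BA"]),
     (3, PySem.Set.ofList ["MT","MS","GO","DF"]),
     (4, PySem.Set.ofList ["RJ","SP","ES","MG"]),
     (5, PySem.Set.ofList ["PR","RS","SC"])]

def regioes_alt (opcao : Int) (listaCTS : List String) : Option (List String) :=
  match pvGroups.get? opcao with
  | none => none
  | some codes => some (listaCTS.filter (fun item => PySem.Set.contains codes (pvCodeOf item)))

-- ===== PRECONDITION & SPEC =====
def Spec_regioes (opcao : Int) (listaCTS : List String) (out : Option (List String)) : Prop := out = regioes_alt opcao listaCTS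
instance (opcao : Int) (listaCTS : List String) (out : Option (List String)) : Decidable (Spec_regioes opcao listaCTS out) := by unfold Spec_regioes; infer_instance

-- ===== CLAIM (what is proved, stated in full; the proofs are below) =====
def Claim_equal_regioes : Prop := ∀ (opcao : Int) (listaCTS : List String), Dom_regioes opcao listaCTS → Spec_regioes opcao listaCTS (regioes opcao listaCTS)

-- ===== LEMMAS AND PROOFS =====

-- proof-only: the r-th group as a plain list (region order of A's tabela)
def pvG : Nat → List String
  | 0 => ["AM","RR","AP","PA","TO","RO","AC"]
  | 1 => ["MA","PI","CE","RN","PE","PB","SE","AL","BA"]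
  | 2 => ["MT","MS","GO","DF"]
  | 3 => ["RJ","SP","ES","MG"]
  | 4 => ["PR","RS","SC"]
  | _ => []

-- A's loop body appends s to bucket r exactly when s's code is in group r
set_option maxHeartbeats 1000000 in
theorem pvStepA_eq (a b c d e : List String) (s : String) :
    pvStepA (a, b, c, d, e) s =
      (a ++ if pvCodeOf s ∈ pvG 0 then [s] else [],
       b ++ if pvCodeOf s ∈ pvG 1 then [s] else [],
       c ++ if pvCodeOf s ∈ pvG 2 then [s] else [],
       d ++ if pvCodeOf s ∈ pvG 3 then [s] else [],
       e ++ if pvCodeOf s ∈ pvG 4 then [s] else []) := by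
  unfold pvStepA
  generalize pvCodeOf s = code
  by_cases hm : code ∈ pvTabela
  · fin_cases hm <;>
      · simp only [List.contains_eq_mem, decide_eq_true_eq, ge_iff_le]
        repeat first
          | rw [if_pos (by decide)]
          | rw [if_neg (by decide)]
        simp
  · have h0 : code ∉ pvG 0 := by intro hc; apply hm; fin_cases hc <;> decide
    have h1 : code ∉ pvG 1 := by intro hc; apply hm; fin_cases hc <;> decide
    have h2 : code ∉ pvG 2 := by intro hc; apply hm; fin_cases hc <;> decide
    have h3 : code ∉ pvG 3 := by intro hc; apply hm; fin_cases hc <;> decide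
    have h4 : code ∉ pvG 4 := by intro hc; apply hm; fin_cases hc <;> decide
    simp only [List.contains_eq_mem, decide_eq_true_eq]
    rw [if_neg hm]
    simp [h0, h1, h2, h3, h4]

-- folding A's step from (a,…,e) appends, bucket-wise, the filter of l by "code in group r"
theorem pvFoldA (l : List String) :
    ∀ (a b c d e : List String),
    l.foldl pvStepA (a, b, c, d, e) =
      (a ++ l.filter (fun s => decide (pvCodeOf s ∈ pvG 0)),
       b ++ l.filter (fun s => decide (pvCodeOf s ∈ pvG 1)),
       c ++ l.filter (fun s => decide (pvCodeOf s ∈ pvG 2)),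
       d ++ l.filter (fun s => decide (pvCodeOf s ∈ pvG 3)),
       e ++ l.filter (fun s => decide (pvCodeOf s ∈ pvG 4))) := by
  induction l with
  | nil => intro a b c d e; simp
  | cons s t ih =>
    intro a b c d e
    rw [List.foldl_cons, pvStepA_eq, ih]
    simp only [List.filter_cons]
    by_cases h0 : pvCodeOf s ∈ pvG 0 <;>
      by_cases h1 : pvCodeOf s ∈ pvG 1 <;>
      by_cases h2 : pvCodeOf s ∈ pvG 2 <;>
      by_cases h3 : pvCodeOf s ∈ pvG 3 <;>
      by_cases h4 : pvCodeOf s ∈ pvG 4 <;>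
      simp [h0, h1, h2, h3, h4]

set_option maxHeartbeats 1000000 in
theorem regioes_eq (opcao : Int) (listaCTS : List String) :
    regioes opcao listaCTS = regioes_alt opcao listaCTS := by
  simp only [regioes, regioes_alt]
  rw [PySem.List.foldl_pyRange_pyGetD listaCTS "" pvStepA _ (le_refl 0)]
  simp only [Int.toNat_zero, List.drop_zero]
  rw [pvFoldA listaCTS [] [] [] [] []]
  by_cases h1 : opcao = 1
  · subst h1
    have hs : pvGroups.get? 1 = some ["AM","RR","AP","PA","TO","RO","AC"] := by decide
    rw [hs]
    norm_num
    refine List.filter_congr (fun x _ => ?_)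
    simp [pvG]
  by_cases h2 : opcao = 2
  · subst h2
    have hs : pvGroups.get? 2 = some ["MA","PI","CE","RN","PE","PB","SE","AL","BA"] := by decide
    rw [hs]
    norm_num
    refine List.filter_congr (fun x _ => ?_)
    simp [pvG]
  by_cases h3 : opcao = 3
  · subst h3
    have hs : pvGroups.get? 3 = some ["MT","MS","GO","DF"] := by decide
    rw [hs]
    norm_num
    refine List.filter_congr (fun x _ => ?_)
    simp [pvG]
  by_cases h4 : opcao = 4
  · subst h4
    have hs : pvGroups.get? 4 = some ["RJ","SP","ES","MG"] := by decide
    rw [hs]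
    norm_num
    refine List.filter_congr (fun x _ => ?_)
    simp [pvG]
  by_cases h5 : opcao = 5
  · subst h5
    have hs : pvGroups.get? 5 = some ["PR","RS","SC"] := by decide
    rw [hs]
    norm_num
    refine List.filter_congr (fun x _ => ?_)
    simp [pvG]
  have hget : pvGroups.get? opcao = none := by
    apply (PySem.Dict.get?_eq_none_iff_not_mem_keys _ _).2
    have hk : pvGroups.keys = [1, 2, 3, 4, 5] := by decide
    rw [hk]
    simp only [List.mem_cons, List.not_mem_nil, or_false]
    simp [h1, h2, h3, h4, h5]
  rw [hget]
  simp [h1, h2, h3, h4, h5]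

-- ===== VERDICT (by name: the statement is the Claim_ definition above) =====
theorem regioes_spec : Claim_equal_regioes := by
  intro opcao listaCTS _
  unfold Spec_regioes
  exact regioes_eq opcao listaCTS
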